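-- pv_equiv track=rewrite | github.com/MrWater98/vcd2stimuli | src/main.py | organize_by_cycle
-- ===== SOURCE A (Python) =====
-- from collections import defaultdict
--
-- def organize_by_cycle(results):
--     """将结果按周期组织"""
--     cycle_data = defaultdict(dict)
--     all_times = set()
--
--     # 收集所有时间点
--     for signal_name, tv_pairs in results.items():
--         for time, value in tv_pairs:
--             all_times.add(time)
--
--     # 按时间排序
--     sorted_times = sorted(all_times)
--
--     # 对每个信号，找到每个时间点的值
--     for signal_name, tv_pairs in results.items():
--         current_value = 'x'  # 默认值
--         tv_index = 0
--
--         for time in sorted_times: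
--             # 更新当前值
--             while tv_index < len(tv_pairs) and tv_pairs[tv_index][0] <= time:
--                 current_value = tv_pairs[tv_index][1]
--                 tv_index += 1
--
--             cycle_data[time][signal_name] = current_value
--
--     return cycle_data, sorted_times
-- ===== SOURCE B (Python) =====
-- from bisect import bisect_right
--
--
-- def organize_by_cycle(results):
--     """将结果按周期组织 (prefix-max table + binary search, no cursor state)"""
--     sorted_times = sorted({t for tv_pairs in results.values() for t, _ in tv_pairs})
--     # Per signal: running prefix-maximum of the pair times, and the pair values.
--     # A's two-pointer consumes, at time t, exactly the longest prefix of tv_pairs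
--     # whose times are all <= t, i.e. the longest prefix with prefix_max <= t.
--     tables = {}
--     for signal_name, tv_pairs in results.items():
--         prefix_max, values, m = [], [], None
--         for t, v in tv_pairs:
--             m = t if m is None else max(m, t)
--             prefix_max.append(m)
--             values.append(v)
--         tables[signal_name] = (prefix_max, values)
--     cycle_data = {}
--     for time in sorted_times:
--         row = {}
--         for signal_name, (prefix_max, values) in tables.items():
--             k = bisect_right(prefix_max, time)
--             row[signal_name] = values[k - 1] if k else 'x'
--         cycle_data[time] = row
--     return cycle_data, sorted_times
-- ===== Notes on version B (the rewrite author's own statement) =====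
-- stated objective: alternative
-- what changed: Replaces A's stateful two-pointer sweep per signal with a stateless table lookup: B precomputes, per signal, the running prefix-maximum of the pair times, and answers each (signal, time) cell independently by binary search (bisect_right) into that nondecreasing array -- correct because A's pointer at time t has consumed exactly the longest prefix of tv_pairs whose times are all <= t, i.e. whose prefix-max is <= t.
import Mathlib
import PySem

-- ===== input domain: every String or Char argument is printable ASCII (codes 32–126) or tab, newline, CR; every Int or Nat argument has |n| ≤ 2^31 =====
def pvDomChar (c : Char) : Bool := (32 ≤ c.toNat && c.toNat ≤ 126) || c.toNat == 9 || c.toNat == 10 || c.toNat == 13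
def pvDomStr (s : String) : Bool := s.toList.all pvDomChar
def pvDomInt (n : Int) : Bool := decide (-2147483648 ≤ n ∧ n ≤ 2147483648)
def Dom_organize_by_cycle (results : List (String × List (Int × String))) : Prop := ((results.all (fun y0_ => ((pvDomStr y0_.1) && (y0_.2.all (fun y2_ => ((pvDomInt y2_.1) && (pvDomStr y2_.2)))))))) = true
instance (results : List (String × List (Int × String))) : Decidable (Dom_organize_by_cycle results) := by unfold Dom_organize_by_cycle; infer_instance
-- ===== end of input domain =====

-- B answers each (signal, time) cell independently by binary search into a per-signal
-- prefix-maximum table, instead of A's stateful two-pointer sweep per signal (objective: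
-- alternative algorithm, same output).

-- ===== PORT A =====
-- A's inner `while tv_index < len(tv_pairs) and tv_pairs[tv_index][0] <= time` loop
def pvWhileA (ps : List (Int × String)) (t : Int) (cur : String) (idx : Nat) : String × Nat :=
  if h : idx < ps.length then
    if ps[idx].1 ≤ t then pvWhileA ps t ps[idx].2 (idx + 1) else (cur, idx)
  else (cur, idx)
termination_by ps.length - idx

def organize_by_cycle (results : List (String × List (Int × String))) :
    (List (Int × List (String × String))) × List Int :=
  let allTimes : PySem.Set Int :=
    results.foldl (fun s p => p.2.foldl (fun s tv => PySem.Set.add s tv.1) s) PySem.Set.empty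
  let sortedTimes := PySem.List.sorted allTimes (fun x => x) false
  let cycleData : PySem.Dict Int (PySem.Dict String String) :=
    results.foldl (fun cd p =>
      (sortedTimes.foldl
        (fun (st : String × Nat × PySem.Dict Int (PySem.Dict String String)) t =>
          let vi := pvWhileA p.2 t st.1 st.2.1
          (vi.1, vi.2, st.2.2.modify t PySem.Dict.empty (fun inner => inner.insert p.1 vi.1)))
        ("x", 0, cd)).2.2)
      PySem.Dict.empty
  (cycleData.items.map (fun q => (q.1, q.2.items)), sortedTimes)

-- ===== PORT B =====
-- Source B's per-signal table builder: running prefix-max of the times plus the value list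
def pvTable (ps : List (Int × String)) : List Int × List String :=
  let f := ps.foldl
    (fun (st : List Int × List String × Option Int) tv =>
      let m := match st.2.2 with | none => tv.1 | some m => max m tv.1
      (st.1 ++ [m], st.2.1 ++ [tv.2], some m))
    ([], [], none)
  (f.1, f.2.1)

def organize_by_cycle_alt (results : List (String × List (Int × String))) :
    (List (Int × List (String × String))) × List Int :=
  let sortedTimes :=
    PySem.List.sorted (PySem.Set.ofList (results.flatMap (fun p => p.2.map (fun tv => tv.1))))
      (fun x => x) false
  let tables := results.map (fun p => (p.1, pvTable p.2))
  let cycleData : PySem.Dict Int (PySem.Dict String String) :=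
    sortedTimes.foldl
      (fun cd t =>
        cd.insert t (tables.foldl
          (fun (row : PySem.Dict String String) q =>
            let k := PySem.List.bisectRight q.2.1 t
            -- values[k-1] if k else 'x'; the index k-1 is in range, so getD's default is unused
            row.insert q.1 (if 0 < k then q.2.2.getD (k - 1) "x" else "x"))
          PySem.Dict.empty))
      PySem.Dict.empty
  (cycleData.items.map (fun q => (q.1, q.2.items)), sortedTimes)

-- ===== PRECONDITION & SPEC =====
-- Pre_ excludes association lists with duplicate signal names: A's argument is a Python dict,
-- whose keys are necessarily distinct, so no input the Python function accepts is excluded.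
def Pre_organize_by_cycle (results : List (String × List (Int × String))) : Prop :=
  (results.map (fun p => p.1)).Nodup

instance (results : List (String × List (Int × String))) : Decidable (Pre_organize_by_cycle results) := by unfold Pre_organize_by_cycle; infer_instance

def pvWitness_organize_by_cycle : (List (String × List (Int × String))) :=
  [("clk", [(0, "0"), (5, "1")]), ("rst", [(3, "1")]), ("d", [])]

def Spec_organize_by_cycle (results : List (String × List (Int × String))) (out : (List (Int × List (String × String))) × List Int) : Prop := out = organize_by_cycle_alt results
instance (results : List (String × List (Int × String))) (out : (List (Int × List (String × String))) × List Int) : Decidable (Spec_organize_by_cycle results out) := by unfold Spec_organize_by_cycle; infer_instance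

-- ===== CLAIM (what is proved, stated in full; the proofs are below) =====
def Claim_equal_organize_by_cycle : Prop := ∀ (results : List (String × List (Int × String))), Dom_organize_by_cycle results → Pre_organize_by_cycle results → Spec_organize_by_cycle results (organize_by_cycle results)

-- ===== LEMMAS AND PROOFS =====

-- K ps t = length of the longest prefix of ps whose times are all ≤ t
def pvK : List (Int × String) → Int → Nat
  | [], _ => 0
  | tv :: l, t => if tv.1 ≤ t then pvK l t + 1 else 0

-- the value A's pointer shows at time t (after consuming that prefix)
def pvVal (ps : List (Int × String)) (t : Int) : String :=
  if 0 < pvK ps t then (ps.map (fun tv => tv.2)).getD (pvK ps t - 1) "x" else "x"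

theorem pvK_le_length (ps : List (Int × String)) (t : Int) : pvK ps t ≤ ps.length := by
  induction ps with
  | nil => simp [pvK]
  | cons tv l ih => simp only [pvK]; split_ifs <;> simp <;> omega

theorem pvK_lt_imp (t : Int) :
    ∀ (ps : List (Int × String)) (j : Nat) (hj : j < ps.length), j < pvK ps t → ps[j].1 ≤ t := by
  intro ps
  induction ps with
  | nil => intro j hj; simp at hj
  | cons tv l ih =>
    intro j hj h
    simp only [pvK] at h
    split_ifs at h with htv
    · cases j with
      | zero => simpa using htv
      | succ j => exact ih j (by simpa using hj) (by omega)
    · omega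

theorem pvK_stop (t : Int) :
    ∀ (ps : List (Int × String)) (h : pvK ps t < ps.length), t < ps[pvK ps t].1 := by
  intro ps
  induction ps with
  | nil => intro h; simp [pvK] at h
  | cons tv l ih =>
    intro h
    simp only [pvK] at h ⊢
    split_ifs with htv
    · simpa using ih (by simpa [pvK, htv] using h)
    · simpa using htv

theorem pvK_mono (ps : List (Int × String)) {t t' : Int} (h : t' ≤ t) :
    pvK ps t' ≤ pvK ps t := by
  induction ps with
  | nil => simp [pvK]
  | cons tv l ih =>
    simp only [pvK]
    split_ifs with h1 h2
    · omega
    · exact absurd (le_trans h1 h) h2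
    · omega
    · omega

-- running the while loop from any pointer position idx ≤ K lands on (value, K)
theorem pvWhileA_run (ps : List (Int × String)) (t : Int) :
    ∀ (idx : Nat) (cur : String), idx ≤ pvK ps t →
      pvWhileA ps t cur idx = ((if idx = pvK ps t then cur else pvVal ps t), pvK ps t) := by
  intro idx
  induction hn : pvK ps t - idx generalizing idx with
  | zero =>
    intro cur hle
    have hidx : idx = pvK ps t := by omega
    subst hidx
    rw [if_pos rfl, pvWhileA]
    split_ifs with h1 h2
    · exact absurd (pvK_stop t ps h1) (not_lt.mpr h2)
    · rfl
    · rfl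
  | succ n ih =>
    intro cur hle
    have hlt : idx < pvK ps t := by omega
    have hlen : idx < ps.length := lt_of_lt_of_le hlt (pvK_le_length ps t)
    rw [pvWhileA]
    rw [dif_pos hlen, if_pos (pvK_lt_imp t ps idx hlen hlt)]
    rw [ih (idx + 1) (by omega) ps[idx].2 (by omega)]
    have hne : ¬ idx = pvK ps t := by omega
    rw [if_neg hne]
    congr 1
    split_ifs with he
    · -- idx + 1 = K: the consumed value is exactly values[K-1]
      unfold pvVal
      rw [if_pos (by omega)]
      have h1 : pvK ps t - 1 = idx := by omega
      rw [h1, List.getD_eq_getElem?_getD]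
      simp [hlen]
    · rfl

-- ---- the A side as closed-form rows ----

def pvStep (t : Int) (S : List ((String × List (Int × String)) × String × Nat)) :
    List ((String × List (Int × String)) × String × Nat) :=
  S.map (fun q => (q.1, pvWhileA q.1.2 t q.2.1 q.2.2))

def pvRows (S : List ((String × List (Int × String)) × String × Nat)) :
    List Int → List (Int × List (String × String))
  | [] => []
  | t :: ts =>
    (t, (pvStep t S).map (fun q => (q.1.1, q.2.1))) :: pvRows (pvStep t S) ts

theorem pvStep_names (t : Int) (S : List ((String × List (Int × String)) × String × Nat)) :
    (pvStep t S).map (fun q => q.1.1) = S.map (fun q => q.1.1) := by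
  simp [pvStep]

theorem pvRows_keys (ts : List Int) :
    ∀ S, (pvRows S ts).map (fun r => r.1) = ts := by
  induction ts with
  | nil => intro S; rfl
  | cons t ts ih => intro S; simp [pvRows, ih]

-- a per-signal state (cur, idx) is "in sync" for every time still to come
def pvSync (ps : List (Int × String)) (cur : String) (idx : Nat) (ts : List Int) : Prop :=
  ∀ t ∈ ts, idx ≤ pvK ps t ∧ (idx = pvK ps t → cur = pvVal ps t)

theorem pvSync_step {ps : List (Int × String)} {cur : String} {idx : Nat} {t : Int} {ts : List Int}
    (hsync : pvSync ps cur idx (t :: ts)) (hmono : ∀ t' ∈ ts, t ≤ t') :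
    pvWhileA ps t cur idx = (pvVal ps t, pvK ps t)
      ∧ pvSync ps (pvVal ps t) (pvK ps t) ts := by
  obtain ⟨hle, hval⟩ := hsync t (by simp)
  have hrun := pvWhileA_run ps t idx cur hle
  constructor
  · rw [hrun]
    congr 1
    split_ifs with he
    · exact hval he
    · rfl
  · intro t' ht'
    have hm := pvK_mono ps (hmono t' ht')
    refine ⟨hm, fun he => ?_⟩
    unfold pvVal
    rw [he]
  
theorem pvRows_closed :
    ∀ (ts : List Int), ts.Pairwise (· < ·) →
      ∀ (S : List ((String × List (Int × String)) × String × Nat)),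
        (∀ q ∈ S, pvSync q.1.2 q.2.1 q.2.2 ts) →
        pvRows S ts = ts.map (fun t => (t, S.map (fun q => (q.1.1, pvVal q.1.2 t)))) := by
  intro ts
  induction ts with
  | nil => intro _ S _; rfl
  | cons t ts ih =>
    intro hpw S hS
    have hpw' := List.pairwise_cons.mp hpw
    have hstepval : ∀ q ∈ S, pvWhileA q.1.2 t q.2.1 q.2.2 = (pvVal q.1.2 t, pvK q.1.2 t) :=
      fun q hq => (pvSync_step (hS q hq) (fun t' ht' => le_of_lt (hpw'.1 t' ht'))).1
    have hstep : pvStep t S = S.map (fun q => (q.1, (pvVal q.1.2 t, pvK q.1.2 t))) := by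
      unfold pvStep
      apply List.map_congr_left
      intro q hq
      rw [hstepval q hq]
    have hrec := ih hpw'.2 (pvStep t S) (by
      intro q hq
      rw [hstep] at hq
      obtain ⟨q', hq', rfl⟩ := List.mem_map.mp hq
      exact (pvSync_step (hS q' hq') (fun t' ht' => le_of_lt (hpw'.1 t' ht'))).2)
    simp only [pvRows, hrec, List.map_cons]
    congr 1
    · rw [hstep]; simp
    · rw [hstep]
      apply List.map_congr_left
      intro t' _
      simp [List.map_map, Function.comp_def]

-- find?/any/map-if helpers on items lists whose keys avoid t
theorem pv_find_none {ν : Type} (t : Int) :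
    ∀ (l : List (Int × ν)), (∀ q ∈ l, q.1 ≠ t) → List.find? (fun p => p.1 == t) l = none := by
  intro l h
  apply List.find?_eq_none.mpr
  intro q hq
  simp [h q hq]

theorem pv_find_append {ν : Type} (t : Int) (v : ν) (rest : List (Int × ν)) :
    ∀ (done : List (Int × ν)), (∀ q ∈ done, q.1 ≠ t) →
      List.find? (fun p => p.1 == t) (done ++ (t, v) :: rest) = some (t, v) := by
  intro done h
  induction done with
  | nil => simp
  | cons d ds ih =>
    have hd : (d.1 == t) = false := by simp [h d (by simp)]
    simp only [List.cons_append, List.find?_cons, hd]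
    exact ih (fun q hq => h q (by simp [hq]))

theorem pv_map_if {ν : Type} (t : Int) (w : ν) :
    ∀ (l : List (Int × ν)), (∀ q ∈ l, q.1 ≠ t) →
      l.map (fun q => if q.1 == t then (t, w) else q) = l := by
  intro l h
  induction l with
  | nil => rfl
  | cons d ds ih =>
    have hd : d.1 ≠ t := h d (by simp)
    rw [List.map_cons, if_neg (by simpa using hd), ih (fun q hq => h q (by simp [hq]))]

def pvAFold (p : String × List (Int × String)) (ts : List Int)
    (a : String × Nat × PySem.Dict Int (PySem.Dict String String)) :
    String × Nat × PySem.Dict Int (PySem.Dict String String) :=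
  ts.foldl
    (fun (st : String × Nat × PySem.Dict Int (PySem.Dict String String)) t =>
      let vi := pvWhileA p.2 t st.1 st.2.1
      (vi.1, vi.2, st.2.2.modify t PySem.Dict.empty (fun inner => inner.insert p.1 vi.1)))
    a

theorem pvA_first (p : String × List (Int × String)) :
    ∀ (ts : List Int) (st : String × Nat) (cd : PySem.Dict Int (PySem.Dict String String))
      (done : List (Int × PySem.Dict String String)),
      ts.Nodup →
      (∀ t ∈ ts, ∀ q ∈ done, q.1 ≠ t) →
      cd.items = done →
      (pvAFold p ts (st.1, st.2, cd)).2.2.items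
        = done ++ (pvRows [(p, st)] ts).map (fun r => (r.1, PySem.Dict.mk r.2)) := by
  intro ts
  induction ts with
  | nil => intro st cd done _ _ hitems; simpa [pvAFold, pvRows] using hitems
  | cons t ts ih =>
    intro st cd done hnd hkeys hitems
    simp only [pvAFold, List.foldl_cons]
    have hget : cd.getD t PySem.Dict.empty = PySem.Dict.empty := by
      simp [PySem.Dict.getD, PySem.Dict.get?, hitems,
        pv_find_none t done (fun q hq => hkeys t (by simp) q hq)]
    have hcont : cd.contains t = false := by
      simp only [PySem.Dict.contains, hitems]
      simp only [List.any_eq_false]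
      intro q hq; simp [hkeys t (by simp) q hq]
    have hmod : (cd.modify t PySem.Dict.empty
        (fun inner => inner.insert p.1 (pvWhileA p.2 t st.1 st.2).1)).items
        = done ++ [(t, PySem.Dict.mk [(p.1, (pvWhileA p.2 t st.1 st.2).1)])] := by
      rw [PySem.Dict.modify, PySem.Dict.items_insert_of_not_contains _ _ hcont, hitems, hget]
      have : (PySem.Dict.empty.insert p.1 (pvWhileA p.2 t st.1 st.2).1)
          = PySem.Dict.mk [(p.1, (pvWhileA p.2 t st.1 st.2).1)] := by
        apply PySem.Dict.ext
        rw [PySem.Dict.items_insert_of_not_contains _ _ (PySem.Dict.contains_empty p.1)]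
        rfl
      rw [this]
    have hstep := ih (pvWhileA p.2 t st.1 st.2)
      (cd.modify t PySem.Dict.empty (fun inner => inner.insert p.1 (pvWhileA p.2 t st.1 st.2).1))
      (done ++ [(t, PySem.Dict.mk [(p.1, (pvWhileA p.2 t st.1 st.2).1)])])
      (by simp_all)
      (by
        intro t' ht' q hq
        rcases List.mem_append.mp hq with h1 | h2
        · exact hkeys t' (by simp [ht']) q h1
        · have hq1 : q.1 = t := by simp only [List.mem_singleton] at h2; rw [h2]
          rw [hq1]
          simp only [List.nodup_cons] at hnd
          intro he; exact hnd.1 (by rw [he]; exact ht'))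
      hmod
    simp only [pvAFold] at hstep ⊢
    rw [hstep]
    simp [pvRows, pvStep, List.append_assoc]

theorem pvA_signal (p : String × List (Int × String)) :
    ∀ (ts : List Int) (S : List ((String × List (Int × String)) × String × Nat))
      (st : String × Nat) (cd : PySem.Dict Int (PySem.Dict String String))
      (done : List (Int × PySem.Dict String String)),
      ts.Nodup →
      (∀ t ∈ ts, ∀ q ∈ done, q.1 ≠ t) →
      cd.items = done ++ (pvRows S ts).map (fun r => (r.1, PySem.Dict.mk r.2)) →
      p.1 ∉ S.map (fun q => q.1.1) →
      (pvAFold p ts (st.1, st.2, cd)).2.2.items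
        = done ++ (pvRows (S ++ [(p, st)]) ts).map (fun r => (r.1, PySem.Dict.mk r.2)) := by
  intro ts
  induction ts with
  | nil => intro S st cd done _ _ hitems _; simpa [pvAFold, pvRows] using hitems
  | cons t ts ih =>
    intro S st cd done hnd hkeys hitems hname
    simp only [pvAFold, List.foldl_cons]
    simp only [pvRows, List.map_cons] at hitems
    have hrestkeys : ∀ q ∈ (pvRows (pvStep t S) ts).map
        (fun r => (r.1, PySem.Dict.mk (κ := String) (ν := String) r.2)), q.1 ≠ t := by
      intro q hq
      obtain ⟨r, hr, rfl⟩ := List.mem_map.mp hq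
      have hmem : r.1 ∈ ts := by
        rw [← pvRows_keys ts (pvStep t S)]
        exact List.mem_map_of_mem hr
      simp only [List.nodup_cons] at hnd
      intro he; exact hnd.1 (by exact he ▸ hmem)
    have hdonekeys : ∀ q ∈ done, q.1 ≠ t := fun q hq => hkeys t (by simp) q hq
    have hget : cd.getD t PySem.Dict.empty
        = PySem.Dict.mk ((pvStep t S).map (fun q => (q.1.1, q.2.1))) := by
      simp only [PySem.Dict.getD, PySem.Dict.get?, hitems]
      rw [pv_find_append t _ _ done hdonekeys]
      rfl
    have hcont : cd.contains t = true := by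
      simp [PySem.Dict.contains, hitems, List.any_append]
    have hinner : ((PySem.Dict.mk ((pvStep t S).map (fun q => (q.1.1, q.2.1)))).insert
          p.1 (pvWhileA p.2 t st.1 st.2).1).items
        = (pvStep t S).map (fun q => (q.1.1, q.2.1)) ++ [(p.1, (pvWhileA p.2 t st.1 st.2).1)] := by
      rw [PySem.Dict.items_insert_of_not_contains]
      simp only [PySem.Dict.contains, List.any_eq_false]
      intro q hq
      have hmem : q.1 ∈ (pvStep t S).map (fun q => q.1.1) := by
        have := List.mem_map_of_mem (f := fun q => q.1) hq
        simpa [List.map_map] using this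
      rw [pvStep_names] at hmem
      simp only [beq_iff_eq]
      intro he; exact hname (he ▸ hmem)
    have hmod : (cd.modify t PySem.Dict.empty
        (fun inner => inner.insert p.1 (pvWhileA p.2 t st.1 st.2).1)).items
        = done ++ ((t, PySem.Dict.mk ((pvStep t S).map (fun q => (q.1.1, q.2.1))
              ++ [(p.1, (pvWhileA p.2 t st.1 st.2).1)]))
            :: (pvRows (pvStep t S) ts).map (fun r => (r.1, PySem.Dict.mk r.2))) := by
      rw [PySem.Dict.modify, PySem.Dict.items_insert_of_contains _ _ hcont, hitems, hget]
      rw [List.map_append, List.map_cons]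
      rw [pv_map_if t _ done hdonekeys]
      rw [pv_map_if t _ _ hrestkeys]
      simp only [beq_self_eq_true, if_pos]
      have heq : (PySem.Dict.mk ((pvStep t S).map (fun q => (q.1.1, q.2.1)))).insert
            p.1 (pvWhileA p.2 t st.1 st.2).1
          = PySem.Dict.mk ((pvStep t S).map (fun q => (q.1.1, q.2.1))
              ++ [(p.1, (pvWhileA p.2 t st.1 st.2).1)]) := PySem.Dict.ext hinner
      rw [heq]
    have hstep := ih (pvStep t S) (pvWhileA p.2 t st.1 st.2)
      (cd.modify t PySem.Dict.empty (fun inner => inner.insert p.1 (pvWhileA p.2 t st.1 st.2).1))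
      (done ++ [(t, PySem.Dict.mk ((pvStep t S).map (fun q => (q.1.1, q.2.1))
          ++ [(p.1, (pvWhileA p.2 t st.1 st.2).1)]))])
      (by simp_all)
      (by
        intro t' ht' q hq
        rcases List.mem_append.mp hq with h1 | h2
        · exact hkeys t' (by simp [ht']) q h1
        · have hq1 : q.1 = t := by simp only [List.mem_singleton] at h2; rw [h2]
          rw [hq1]
          simp only [List.nodup_cons] at hnd
          intro he; exact hnd.1 (by rw [he]; exact ht'))
      (by rw [hmod]; simp [List.append_assoc])
      (by rw [pvStep_names]; exact hname)
    simp only [pvAFold] at hstep ⊢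
    rw [hstep]
    simp [pvRows, pvStep, List.append_assoc, List.map_append]

theorem pvA_outer (ts : List Int) (hts : ts.Nodup) :
    ∀ (rs : List (String × List (Int × String)))
      (S : List ((String × List (Int × String)) × String × Nat))
      (cd : PySem.Dict Int (PySem.Dict String String)),
      cd.items = (pvRows S ts).map (fun r => (r.1, PySem.Dict.mk r.2)) →
      (S.map (fun q => q.1.1) ++ rs.map (fun p => p.1)).Nodup →
      (rs.foldl (fun cd p => (pvAFold p ts ("x", 0, cd)).2.2) cd).items
        = (pvRows (S ++ rs.map (fun p => (p, ("x", 0)))) ts).map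
            (fun r => (r.1, PySem.Dict.mk r.2)) := by
  intro rs
  induction rs with
  | nil => intro S cd hitems _; simpa using hitems
  | cons p rs ih =>
    intro S cd hitems hnd
    simp only [List.foldl_cons]
    have hname : p.1 ∉ S.map (fun q => q.1.1) := by
      have hdisj := (List.nodup_append.mp hnd).2.2
      intro hmem
      exact hdisj p.1 hmem p.1 (by simp) rfl
    have h1 := pvA_signal p ts S ("x", 0) cd [] hts (by simp) (by simpa using hitems) hname
    have h2 := ih (S ++ [(p, ("x", 0))]) _ (by simpa using h1)
      (by
        have : (S.map (fun q => q.1.1) ++ [p.1]) ++ rs.map (fun p => p.1)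
            = S.map (fun q => q.1.1) ++ (p :: rs).map (fun p => p.1) := by simp
        rw [List.map_append]
        simpa [this] using hnd)
    rw [h2]
    simp [List.append_assoc]

theorem pv_times (results : List (String × List (Int × String))) :
    results.foldl (fun s p => p.2.foldl (fun s tv => PySem.Set.add s tv.1) s) PySem.Set.empty
      = PySem.Set.ofList (results.flatMap (fun p => p.2.map (fun tv => tv.1))) := by
  rw [PySem.Set.ofList_eq_foldl]
  have h : ∀ (rs : List (String × List (Int × String))) (s : PySem.Set Int),
      rs.foldl (fun s p => p.2.foldl (fun s tv => PySem.Set.add s tv.1) s) s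
        = List.foldl PySem.Set.add s (rs.flatMap (fun p => p.2.map (fun tv => tv.1))) := by
    intro rs
    induction rs with
    | nil => intro s; rfl
    | cons p rs ih => intro s; simp [List.foldl_append, List.foldl_map, ih]
  exact h results PySem.Set.empty

-- ---- the B side ----

-- the "spec" prefix-max list of pvTable, with the running max carried explicitly
def pvPms : List (Int × String) → Option Int → List Int
  | [], _ => []
  | tv :: l, none => tv.1 :: pvPms l (some tv.1)
  | tv :: l, some m => max m tv.1 :: pvPms l (some (max m tv.1))

theorem pvTable_eq_aux :
    ∀ (ps : List (Int × String)) (pmAcc : List Int) (vAcc : List String) (g : Option Int),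
      (ps.foldl
        (fun (st : List Int × List String × Option Int) tv =>
          let m := match st.2.2 with | none => tv.1 | some m => max m tv.1
          (st.1 ++ [m], st.2.1 ++ [tv.2], some m))
        (pmAcc, vAcc, g)).1 = pmAcc ++ pvPms ps g
      ∧ (ps.foldl
        (fun (st : List Int × List String × Option Int) tv =>
          let m := match st.2.2 with | none => tv.1 | some m => max m tv.1
          (st.1 ++ [m], st.2.1 ++ [tv.2], some m))
        (pmAcc, vAcc, g)).2.1 = vAcc ++ ps.map (fun tv => tv.2) := by
  intro ps
  induction ps with
  | nil => intro pmAcc vAcc g; simp [pvPms]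
  | cons tv l ih =>
    intro pmAcc vAcc g
    cases g with
    | none =>
      have := ih (pmAcc ++ [tv.1]) (vAcc ++ [tv.2]) (some tv.1)
      constructor
      · simpa [pvPms, List.append_assoc] using this.1
      · simpa [List.append_assoc] using this.2
    | some m =>
      have := ih (pmAcc ++ [max m tv.1]) (vAcc ++ [tv.2]) (some (max m tv.1))
      constructor
      · simpa [pvPms, List.append_assoc] using this.1
      · simpa [List.append_assoc] using this.2

theorem pvTable_eq (ps : List (Int × String)) :
    pvTable ps = (pvPms ps none, ps.map (fun tv => tv.2)) := by
  have h := pvTable_eq_aux ps [] [] none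
  unfold pvTable
  exact Prod.ext (by simpa using h.1) (by simpa using h.2)

theorem pvPms_length : ∀ (ps : List (Int × String)) (g : Option Int),
    (pvPms ps g).length = ps.length := by
  intro ps
  induction ps with
  | nil => intro g; cases g <;> rfl
  | cons tv l ih => intro g; cases g <;> simp [pvPms, ih]

-- gok g t: the carried running max (if any) is ≤ t
def pvGok (g : Option Int) (t : Int) : Prop := ∀ m, g = some m → m ≤ t

theorem pvPms_le_iff (t : Int) :
    ∀ (ps : List (Int × String)) (g : Option Int) (j : Nat) (hj : j < (pvPms ps g).length),
      ((pvPms ps g)[j] ≤ t ↔ (pvGok g t ∧ j < pvK ps t)) := by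
  intro ps
  induction ps with
  | nil => intro g j hj; cases g <;> simp [pvPms] at hj
  | cons tv l ih =>
    intro g j hj
    cases g with
    | none =>
      cases j with
      | zero =>
        simp only [pvPms, List.getElem_cons_zero, pvK, pvGok]
        constructor
        · intro h; refine ⟨by simp, ?_⟩; rw [if_pos h]; omega
        · intro ⟨_, h⟩; by_contra hc; rw [if_neg hc] at h; omega
      | succ j =>
        simp only [pvPms, List.getElem_cons_succ]
        rw [ih (some tv.1) j (by simpa [pvPms] using hj)]
        simp only [pvGok, pvK]
        constructor
        · intro ⟨h1, h2⟩
          have htv : tv.1 ≤ t := h1 tv.1 rfl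
          exact ⟨by simp, by rw [if_pos htv]; omega⟩
        · intro ⟨_, h2⟩
          by_cases htv : tv.1 ≤ t
          · rw [if_pos htv] at h2
            exact ⟨fun m hm => by injection hm with hm; omega, by omega⟩
          · rw [if_neg htv] at h2; omega
    | some m =>
      cases j with
      | zero =>
        simp only [pvPms, List.getElem_cons_zero, pvK, pvGok, max_le_iff]
        constructor
        · intro ⟨h1, h2⟩
          refine ⟨fun m' hm' => by injection hm' with hm'; omega, ?_⟩
          rw [if_pos h2]; omega
        · intro ⟨h1, h2⟩
          refine ⟨h1 m rfl, ?_⟩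
          by_contra hc; rw [if_neg hc] at h2; omega
      | succ j =>
        simp only [pvPms, List.getElem_cons_succ]
        rw [ih (some (max m tv.1)) j (by simpa [pvPms] using hj)]
        simp only [pvGok, pvK]
        constructor
        · intro ⟨h1, h2⟩
          have hmx : max m tv.1 ≤ t := h1 _ rfl
          refine ⟨fun m' hm' => by injection hm' with hm'; simp at hmx; omega, ?_⟩
          rw [if_pos (by simp at hmx; omega)]; omega
        · intro ⟨h1, h2⟩
          have hm' : m ≤ t := h1 m rfl
          by_cases htv : tv.1 ≤ t
          · rw [if_pos htv] at h2
            exact ⟨fun m' hm'' => by injection hm'' with hm''; simp [← hm'']; omega, by omega⟩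
          · rw [if_neg htv] at h2; omega

theorem pvPms_pairwise (ps : List (Int × String)) :
    (pvPms ps none).Pairwise (fun a b => a ≤ b) := by
  rw [List.pairwise_iff_getElem]
  intro i j hi hj hij
  have hj' := (pvPms_le_iff (pvPms ps none)[j] ps none j hj).mp (le_refl _)
  exact (pvPms_le_iff (pvPms ps none)[j] ps none i hi).mpr ⟨hj'.1, by omega⟩

theorem pvBisect_eq_pvK (ps : List (Int × String)) (t : Int) :
    PySem.List.bisectRight (pvPms ps none) t = pvK ps t := by
  obtain ⟨h1, h2, h3⟩ := PySem.List.bisectRight_spec (pvPms ps none) t (pvPms_pairwise ps)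
  set k := PySem.List.bisectRight (pvPms ps none) t with hk
  have hKlen : pvK ps t ≤ (pvPms ps none).length := by
    rw [pvPms_length]; exact pvK_le_length ps t
  rcases lt_trichotomy k (pvK ps t) with h | h | h
  · have hlt : k < (pvPms ps none).length := lt_of_lt_of_le h hKlen
    have := h3 k hlt (le_refl _)
    have hg : pvGok none t := fun m hm => by simp at hm
    have := (pvPms_le_iff t ps none k hlt).mpr ⟨hg, h⟩
    omega
  · exact h
  · have hlt : pvK ps t < (pvPms ps none).length := lt_of_lt_of_le h h1
    have hle := h2 (pvK ps t) hlt h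
    have := (pvPms_le_iff t ps none (pvK ps t) hlt).mp hle
    omega

-- B's cell value is pvVal
theorem pvCell_eq (ps : List (Int × String)) (t : Int) :
    (if 0 < PySem.List.bisectRight (pvTable ps).1 t
      then (pvTable ps).2.getD (PySem.List.bisectRight (pvTable ps).1 t - 1) "x" else "x")
    = pvVal ps t := by
  rw [pvTable_eq]
  simp only [pvBisect_eq_pvK]
  unfold pvVal
  rfl

-- folding fresh-key inserts into a dict appends the mapped items
theorem pv_items_foldl_insert {α κ ν : Type} [BEq κ] [LawfulBEq κ] (f : α → κ) (g : α → ν) :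
    ∀ (l : List α) (d : PySem.Dict κ ν),
      (∀ a ∈ l, d.contains (f a) = false) →
      (l.map f).Nodup →
      (l.foldl (fun d a => d.insert (f a) (g a)) d).items
        = d.items ++ l.map (fun a => (f a, g a)) := by
  intro l
  induction l with
  | nil => intro d _ _; simp
  | cons a l ih =>
    intro d hfresh hnd
    simp only [List.map_cons, List.nodup_cons] at hnd
    simp only [List.foldl_cons]
    have hca : d.contains (f a) = false := hfresh a (by simp)
    have hstep := ih (d.insert (f a) (g a))
      (by
        intro b hb
        rw [PySem.Dict.contains_insert]
        simp only [Bool.or_eq_false_iff]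
        refine ⟨?_, hfresh b (by simp [hb])⟩
        rw [beq_eq_false_iff_ne]
        intro he
        exact hnd.1 (he ▸ List.mem_map_of_mem (f := f) hb))
      hnd.2
    rw [hstep, PySem.Dict.items_insert_of_not_contains _ _ hca]
    simp [List.append_assoc]

-- ===== VERDICT (by name: the statement is the Claim_ definition above) =====
set_option maxHeartbeats 2000000 in
theorem organize_by_cycle_spec : Claim_equal_organize_by_cycle := by
  intro results _hdom hpre
  unfold Pre_organize_by_cycle at hpre
  unfold Spec_organize_by_cycle
  unfold organize_by_cycle organize_by_cycle_alt
  simp only [pv_times]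
  cases results with
  | nil => rfl
  | cons p rest =>
    set ts := PySem.List.sorted
        (PySem.Set.ofList ((p :: rest).flatMap (fun p => p.2.map (fun tv => tv.1))))
        (fun x => x) false with hts
    have htslt : ts.Pairwise (· < ·) := PySem.List.sorted_ofList_pairwise_lt _
    have htsnd : ts.Nodup := htslt.imp (fun h => ne_of_lt h)
    -- A's dict as pvRows
    have h1 := pvA_first p ts ("x", 0) PySem.Dict.empty [] htsnd (by simp) rfl
    have h2 := pvA_outer ts htsnd rest [(p, ("x", 0))]
      ((pvAFold p ts ("x", 0, PySem.Dict.empty)).2.2)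
      (by simpa using h1)
      (by simpa [Function.comp_def] using hpre)
    -- pvRows in closed form
    have hsync : ∀ q ∈ ((p :: rest).map (fun p => (p, (("x" : String), (0 : Nat))))),
        pvSync q.1.2 q.2.1 q.2.2 ts := by
      intro q hq
      obtain ⟨p', hp', rfl⟩ := List.mem_map.mp hq
      intro t ht
      refine ⟨Nat.zero_le _, fun he => ?_⟩
      unfold pvVal
      rw [← he]
      simp
    have hA := pvRows_closed ts htslt ((p :: rest).map (fun p => (p, ("x", 0)))) hsync
    -- B's inner row dict in closed form
    have hrowitems : ∀ t : Int,
        (((p :: rest).map (fun p => (p.1, pvTable p.2))).foldl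
          (fun (row : PySem.Dict String String) q =>
            let k := PySem.List.bisectRight q.2.1 t
            row.insert q.1 (if 0 < k then q.2.2.getD (k - 1) "x" else "x"))
          PySem.Dict.empty).items
        = (p :: rest).map (fun p' => (p'.1, pvVal p'.2 t)) := by
      intro t
      have hfold : (((p :: rest).map (fun p => (p.1, pvTable p.2))).foldl
          (fun (row : PySem.Dict String String) q =>
            let k := PySem.List.bisectRight q.2.1 t
            row.insert q.1 (if 0 < k then q.2.2.getD (k - 1) "x" else "x"))
          PySem.Dict.empty).items
          = (PySem.Dict.empty : PySem.Dict String String).items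
            ++ ((p :: rest).map (fun p => (p.1, pvTable p.2))).map
              (fun q => (q.1, if 0 < PySem.List.bisectRight q.2.1 t
                then q.2.2.getD (PySem.List.bisectRight q.2.1 t - 1) "x" else "x")) :=
        pv_items_foldl_insert
          (fun q : String × (List Int × List String) => q.1)
          (fun q => if 0 < PySem.List.bisectRight q.2.1 t
            then q.2.2.getD (PySem.List.bisectRight q.2.1 t - 1) "x" else "x")
          ((p :: rest).map (fun p => (p.1, pvTable p.2))) PySem.Dict.empty
          (fun a _ => PySem.Dict.contains_empty _)
          (by simpa [List.map_map, Function.comp_def] using hpre)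
      rw [hfold]
      have hempty : (PySem.Dict.empty : PySem.Dict String String).items = [] := rfl
      rw [hempty, List.nil_append, List.map_map]
      apply List.map_congr_left
      intro p' _
      simp only [Function.comp_def]
      rw [pvCell_eq p'.2 t]
    -- B's outer dict in closed form
    have houter : (ts.foldl
        (fun (cd : PySem.Dict Int (PySem.Dict String String)) t =>
          cd.insert t (((p :: rest).map (fun p => (p.1, pvTable p.2))).foldl
            (fun (row : PySem.Dict String String) q =>
              let k := PySem.List.bisectRight q.2.1 t
              row.insert q.1 (if 0 < k then q.2.2.getD (k - 1) "x" else "x"))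
            PySem.Dict.empty))
        PySem.Dict.empty).items
        = (PySem.Dict.empty : PySem.Dict Int (PySem.Dict String String)).items
          ++ ts.map (fun t => (t, ((p :: rest).map (fun p => (p.1, pvTable p.2))).foldl
            (fun (row : PySem.Dict String String) q =>
              let k := PySem.List.bisectRight q.2.1 t
              row.insert q.1 (if 0 < k then q.2.2.getD (k - 1) "x" else "x"))
            PySem.Dict.empty)) :=
      pv_items_foldl_insert (fun t : Int => t)
        (fun t => ((p :: rest).map (fun p => (p.1, pvTable p.2))).foldl
          (fun (row : PySem.Dict String String) q =>
            let k := PySem.List.bisectRight q.2.1 t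
            row.insert q.1 (if 0 < k then q.2.2.getD (k - 1) "x" else "x"))
          PySem.Dict.empty)
        ts PySem.Dict.empty
        (fun a _ => PySem.Dict.contains_empty _)
        (by simpa [List.map_id_fun'] using htsnd)
    refine Prod.ext ?_ rfl
    show ((p :: rest).foldl (fun cd p => (pvAFold p ts ("x", 0, cd)).2.2)
          PySem.Dict.empty).items.map (fun q => (q.1, q.2.items))
        = _
    rw [List.foldl_cons, h2]
    have hS : ([(p, (("x" : String), (0 : Nat)))] ++ rest.map (fun p => (p, ("x", 0))))
        = (p :: rest).map (fun p => (p, ("x", 0))) := by simp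
    rw [hS, hA]
    rw [houter]
    have hempty2 : (PySem.Dict.empty : PySem.Dict Int (PySem.Dict String String)).items = [] := rfl
    rw [hempty2, List.nil_append]
    dsimp only
    simp only [List.map_map]
    apply List.map_congr_left
    intro t _
    simp only [Function.comp_def]
    rw [hrowitems t]
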